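-- pv_equiv track=rewrite | github.com/DawarWaqar/smart_cloud_tag | src/smart_cloud_tag/schemas.py | sanitize_tag_key
-- ===== SOURCE A (Python) =====
-- def sanitize_tag_key(key: str) -> str:
--     """
--     Sanitize tag key to ensure it's valid for AWS S3.
--
--     Args:
--         key: Raw tag key
--
--     Returns:
--         Sanitized tag key
--     """
--     # Remove leading/trailing whitespace
--     sanitized = key.strip()
--
--     # Replace invalid characters with underscores
--     invalid_chars = [
--         " ",
--         "\t",
--         "\n",
--         "\r",
--         "\\",
--         "/",
--         ":",
--         "*",
--         "?",
--         '"',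
--         "<",
--         ">",
--         "|",
--     ]
--     for char in invalid_chars:
--         sanitized = sanitized.replace(char, "_")
--
--     # Ensure it starts with a letter or number
--     if sanitized and not sanitized[0].isalnum():
--         sanitized = "tag_" + sanitized
--
--     # Truncate if too long
--     if len(sanitized) > 128:
--         sanitized = sanitized[:128]
--
--     return sanitized
-- ===== SOURCE B (Python) =====
-- _INVALID = '\t\n\r \\/:*?"<>|'
--
--
-- def sanitize_tag_key(key: str) -> str:
--     s = key.strip()
--     # decide the prefix up front: replacement never turns a non-alnum first
--     # char into an alnum one ('_' is not alnum), so s[0] already tells us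
--     out = list("tag_") if s and not s[0].isalnum() else []
--     for c in s:
--         if len(out) == 128:
--             break
--         out.append("_" if c in _INVALID else c)
--     return "".join(out)
-- ===== Notes on version B (the rewrite author's own statement) =====
-- stated objective: alternative
-- what changed: A runs 13 sequential full-string .replace passes, then a prefix guard and a guarded truncation on the finished string; B decides the prefix up front from the stripped string's first character, then emits at most 128 output characters in one bounded accumulator loop (breaking at length 128) with a single membership test per character.
import Mathlib
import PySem

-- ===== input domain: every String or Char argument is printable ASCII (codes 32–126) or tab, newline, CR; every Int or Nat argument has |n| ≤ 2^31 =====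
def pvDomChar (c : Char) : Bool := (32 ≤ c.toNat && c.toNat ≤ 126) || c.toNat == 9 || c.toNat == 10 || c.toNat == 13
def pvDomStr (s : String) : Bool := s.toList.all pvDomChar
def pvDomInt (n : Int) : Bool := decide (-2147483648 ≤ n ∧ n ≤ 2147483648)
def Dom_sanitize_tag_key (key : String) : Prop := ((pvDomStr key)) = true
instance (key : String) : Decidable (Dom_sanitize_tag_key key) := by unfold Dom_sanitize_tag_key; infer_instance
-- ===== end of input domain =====

-- B replaces A's 13 sequential full-string replace passes and two post-passes (prefix guard,
-- guarded truncation) by deciding the prefix up front and emitting at most 128 output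
-- characters in one bounded accumulator loop (objective: alternative single bounded pass).

-- ===== PORT A =====
-- the invalid_chars list of A, in A's order
def pvInvalidCharsA : List Char :=
  [' ', '\t', '\n', '\r', '\\', '/', ':', '*', '?', '"', '<', '>', '|']

-- 'if sanitized and not sanitized[0].isalnum(): sanitized = "tag_" + sanitized'
def pvGuardA (s : List Char) : List Char :=
  match s with
  | [] => s
  | c :: _ => if PySem.Chars.isalnum c then s else "tag_".toList ++ s

def sanitize_tag_key (key : String) : String :=
  let s1 := PySem.Chars.strip key.toList
  -- 'for char in invalid_chars: sanitized = sanitized.replace(char, "_")'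
  let s2 := pvInvalidCharsA.foldl (fun s c => PySem.Chars.replace s [c] ['_']) s1
  let s3 := pvGuardA s2
  -- 'if len(sanitized) > 128: sanitized = sanitized[:128]'
  let s4 := if 128 < s3.length then PySem.List.slice s3 none (some 128) else s3
  String.ofList s4

-- ===== PORT B =====
-- B's _INVALID string, as its character list, in B's order
def pvInvalidB : List Char :=
  ['\t', '\n', '\r', ' ', '\\', '/', ':', '*', '?', '"', '<', '>', '|']

-- 'for c in s: if len(out) == 128: break; out.append(...)'
def pvLoopB (s : List Char) (out : List Char) : List Char :=
  match s with
  | [] => out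
  | c :: t =>
    if out.length == 128 then out
    else pvLoopB t (out ++ [if pvInvalidB.contains c then '_' else c])

def sanitize_tag_key_alt (key : String) : String :=
  let s := PySem.Chars.strip key.toList
  -- 'out = list("tag_") if s and not s[0].isalnum() else []'
  let out : List Char :=
    match s with
    | [] => []
    | c :: _ => if PySem.Chars.isalnum c then [] else "tag_".toList
  String.ofList (pvLoopB s out)

-- ===== PRECONDITION & SPEC =====
def Spec_sanitize_tag_key (key : String) (out : String) : Prop := out = sanitize_tag_key_alt key
instance (key : String) (out : String) : Decidable (Spec_sanitize_tag_key key out) := by unfold Spec_sanitize_tag_key; infer_instance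

-- ===== CLAIM (what is proved, stated in full; the proofs are below) =====
def Claim_equal_sanitize_tag_key : Prop := ∀ (key : String), Dom_sanitize_tag_key key → Spec_sanitize_tag_key key (sanitize_tag_key key)

-- ===== LEMMAS AND PROOFS =====

-- A's replacement of one character, applied characterwise
def pvRepl (c : Char) : Char := if c ∈ pvInvalidCharsA then '_' else c

-- replace by a single character: go computes the character-wise map
theorem replace_go_single (a b : Char) : ∀ (fuel : Nat) (l acc : List Char), l.length ≤ fuel →
    PySem.Chars.replace.go [a] [b] fuel l acc = acc.reverse ++ l.map (fun c => if c = a then b else c) := by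
  intro fuel
  induction fuel with
  | zero =>
    intro l acc h
    cases l with
    | nil => simp [PySem.Chars.replace.go]
    | cons c t => simp at h
  | succ n ih =>
    intro l acc h
    cases l with
    | nil => simp [PySem.Chars.replace.go]
    | cons c t =>
      by_cases hc : c = a
      · subst hc
        have hp : List.isPrefixOf [c] (c :: t) = true := by simp [List.isPrefixOf]
        rw [show PySem.Chars.replace.go [c] [b] (n+1) (c :: t) acc =
              (if List.isPrefixOf [c] (c :: t) then PySem.Chars.replace.go [c] [b] n (List.drop 1 (c::t)) ([b].reverse ++ acc)
               else PySem.Chars.replace.go [c] [b] n t (c :: acc)) from rfl]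
        simp only [hp, if_true, List.drop_one, List.tail_cons, List.reverse_cons, List.reverse_nil, List.nil_append]
        rw [show [b] ++ acc = b :: acc from rfl, ih t (b :: acc) (by simpa using h)]
        simp
      · have hp : List.isPrefixOf [a] (c :: t) = false := by
          simp [List.isPrefixOf]; exact fun h' => hc h'.symm
        rw [show PySem.Chars.replace.go [a] [b] (n+1) (c :: t) acc =
              (if List.isPrefixOf [a] (c :: t) then PySem.Chars.replace.go [a] [b] n (List.drop 1 (c::t)) ([b].reverse ++ acc)
               else PySem.Chars.replace.go [a] [b] n t (c :: acc)) from rfl]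
        simp only [hp, if_false, Bool.false_eq_true]
        rw [ih t (c :: acc) (by simpa using h)]
        simp [hc]

theorem replace_single (a b : Char) (s : List Char) :
    PySem.Chars.replace s [a] [b] = s.map (fun c => if c = a then b else c) := by
  rw [show PySem.Chars.replace s [a] [b] = PySem.Chars.replace.go [a] [b] s.length s [] from rfl]
  simpa using replace_go_single a b s.length s [] le_rfl

-- A's replace loop over a list of characters not containing '_' is one membership-driven map
theorem foldl_replace_eq_map : ∀ (l : List Char), '_' ∉ l → ∀ (s : List Char),
    l.foldl (fun t ch => PySem.Chars.replace t [ch] ['_']) s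
      = s.map (fun c => if c ∈ l then '_' else c) := by
  intro l
  induction l with
  | nil => intro _ s; simp
  | cons c l' ih =>
    intro hu s
    have hu' : '_' ∉ l' := fun h => hu (List.mem_cons_of_mem _ h)
    simp only [List.foldl_cons]
    rw [ih hu' _, replace_single, List.map_map]
    apply List.map_congr_left
    intro x _
    by_cases hx : x = c
    · simp [hx, hu']
    · simp [hx, Function.comp]

-- the invalid characters are not alphanumeric
theorem invalid_not_alnum_all : pvInvalidCharsA.all (fun c => !PySem.Chars.isalnum c) = true := by decide

theorem invalid_not_alnum : ∀ c ∈ pvInvalidCharsA, PySem.Chars.isalnum c = false := by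
  intro c hc
  simpa using List.all_eq_true.mp invalid_not_alnum_all c hc

theorem repl_alnum (c : Char) : PySem.Chars.isalnum (pvRepl c) = PySem.Chars.isalnum c := by
  unfold pvRepl
  by_cases h : c ∈ pvInvalidCharsA
  · simp [h, invalid_not_alnum c h]; decide
  · simp [h]

-- A's guard on the mapped string equals B's up-front prefix decision
theorem guard_map (s : List Char) :
    pvGuardA (s.map pvRepl)
      = (match s with
         | [] => ([] : List Char)
         | c :: _ => if PySem.Chars.isalnum c then [] else "tag_".toList) ++ s.map pvRepl := by
  cases s with
  | nil => simp [pvGuardA]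
  | cons c t =>
    simp only [List.map_cons, pvGuardA, repl_alnum c]
    by_cases h : PySem.Chars.isalnum c <;> simp [h]

-- B's bounded accumulator loop computes take 128 of the full output
theorem loopB_take : ∀ (s out : List Char), out.length ≤ 128 →
    pvLoopB s out = (out ++ s.map (fun c => if pvInvalidB.contains c then '_' else c)).take 128 := by
  intro s
  induction s with
  | nil => intro out h; simp [pvLoopB, List.take_of_length_le h]
  | cons c t ih =>
    intro out h
    by_cases he : out.length = 128
    · simp only [pvLoopB, he, beq_self_eq_true, if_true]
      rw [List.take_append_of_le_length (by omega), List.take_of_length_le (by omega)]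
    · have : out.length ≠ 128 := he
      simp only [pvLoopB, beq_iff_eq, this, if_false]
      rw [ih _ (by simp; omega)]
      simp

-- B's membership test agrees with A's replacement map
theorem memB_eq (c : Char) :
    (if pvInvalidB.contains c then '_' else c) = pvRepl c := by
  have hp : pvInvalidB.Perm pvInvalidCharsA := by decide
  unfold pvRepl
  by_cases h : c ∈ pvInvalidCharsA
  · have h' : c ∈ pvInvalidB := hp.mem_iff.mpr h
    simp [h, h']
  · have h' : c ∉ pvInvalidB := fun hc => h (hp.mem_iff.mp hc)
    simp [h, h']

-- A's guarded truncation equals take 128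
theorem tail_eq (s : List Char) :
    (if 128 < s.length then PySem.List.slice s none (some 128) else s) = s.take 128 := by
  rw [show ((some (128 : Int))) = some ((128 : Nat) : Int) from rfl, PySem.List.slice_to_natCast]
  split_ifs with h
  · rfl
  · exact (List.take_of_length_le (by omega)).symm

-- ===== VERDICT (by name: the statement is the Claim_ definition above) =====
theorem sanitize_tag_key_spec : Claim_equal_sanitize_tag_key := by
  intro key _
  unfold Spec_sanitize_tag_key sanitize_tag_key sanitize_tag_key_alt
  simp only
  rw [foldl_replace_eq_map pvInvalidCharsA (by decide)]
  rw [show (fun c => if c ∈ pvInvalidCharsA then '_' else c) = pvRepl from rfl]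
  rw [tail_eq, guard_map, loopB_take]
  · simp only [funext memB_eq]
  · cases hs : PySem.Chars.strip key.toList with
    | nil => simp
    | cons c t => by_cases h : PySem.Chars.isalnum c <;> simp [h]
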